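-- pv_equiv track=rewrite | github.com/webersab/relationExtractionPipeline | de_pipeline/nel.py | create_map_entities
-- ===== SOURCE A (Python) =====
-- def create_map_entities(tagged):
--     """
--     Create a mapping for NEs and common entities
--     """
--     m = {}
--     prev_tag = '0'
--     ent_list = []
--     entpresent = False
--     start = 0
--     for t in range(0,len(tagged)):
--         token = tagged[t][0]
--         tag = tagged[t][1]
--         if tag != prev_tag:
--             if entpresent:
--                 if tag != '0':
--                     ent_string = ' '.join(ent_list)
--                     m[start+1] = (ent_string, prev_tag)
--                     ent_list = [token]
--                     entpresent = True
--                     start = t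
--                 else:
--                     ent_string = ' '.join(ent_list)
--                     m[start+1] = (ent_string, prev_tag)
--                     ent_list = []
--                     entpresent = False
--             else:
--                 ent_list = [token]
--                 entpresent = True
--                 start = t
--         elif tag == prev_tag and entpresent:
--             ent_list.append(token)
--         prev_tag = tag
--     if entpresent:
--         ent_string = ' '.join(ent_list)
--         m[start+1] = (ent_string, prev_tag)
--     return m
-- ===== SOURCE B (Python) =====
-- def create_map_entities(tagged):
--     """
--     Create a mapping for NEs and common entities
--     """
--     m = {}
--     n = len(tagged)
--     i = 0
--     while i < n:
--         tag = tagged[i][1]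
--         j = i + 1
--         while j < n and tagged[j][1] == tag:
--             j += 1
--         if tag != '0':
--             m[i + 1] = (' '.join(tagged[k][0] for k in range(i, j)), tag)
--         i = j
--     return m
-- ===== Notes on version B (the rewrite author's own statement) =====
-- stated objective: simpler
-- what changed: Replaced the entpresent/prev_tag flag-machine fold over all indices with a direct two-pointer scan over maximal same-tag runs: for each run starting at i, an inner while finds its end j and a single dict entry m[i+1] is emitted if the tag is nonzero; no flags, no deferred flush after the loop.
import Mathlib
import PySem

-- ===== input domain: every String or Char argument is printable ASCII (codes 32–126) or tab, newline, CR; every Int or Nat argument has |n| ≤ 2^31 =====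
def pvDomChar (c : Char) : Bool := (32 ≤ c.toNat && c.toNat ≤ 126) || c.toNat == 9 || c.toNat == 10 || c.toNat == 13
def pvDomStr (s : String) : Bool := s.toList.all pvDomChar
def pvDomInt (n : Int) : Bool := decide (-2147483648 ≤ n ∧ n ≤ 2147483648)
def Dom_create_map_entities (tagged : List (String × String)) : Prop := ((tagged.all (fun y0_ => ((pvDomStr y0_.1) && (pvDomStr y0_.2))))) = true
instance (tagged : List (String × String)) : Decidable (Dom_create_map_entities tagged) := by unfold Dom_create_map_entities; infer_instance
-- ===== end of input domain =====

-- B replaces A's entpresent/prev_tag flag machine with a direct scan over maximal same-tag runs (simpler decomposition; return-value equivalence).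


-- ===== PORT A =====
-- loop state: (m, prev_tag, ent_list, entpresent, start)
def create_map_entities (tagged : List (String × String)) : List (Int × String × String) :=
  let init : PySem.Dict Int (String × String) × String × List String × Bool × Int :=
    (PySem.Dict.empty, "0", [], false, 0)
  let fin := (PySem.List.pyRange 0 (PySem.List.len tagged) 1).foldl (fun st t =>
    let m := st.1
    let prev_tag := st.2.1
    let ent_list := st.2.2.1
    let entpresent := st.2.2.2.1
    let start := st.2.2.2.2
    let token := (PySem.List.pyGetD tagged t ("", "")).1
    let tag := (PySem.List.pyGetD tagged t ("", "")).2
    if tag ≠ prev_tag then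
      if entpresent then
        if tag ≠ "0" then
          (m.insert (start + 1) (PySem.Str.join " " ent_list, prev_tag), tag, [token], true, t)
        else
          (m.insert (start + 1) (PySem.Str.join " " ent_list, prev_tag), tag, [], false, start)
      else
        (m, tag, [token], true, t)
    else if tag = prev_tag ∧ entpresent then
      (m, tag, ent_list ++ [token], entpresent, start)
    else
      (m, tag, ent_list, entpresent, start)) init
  (if fin.2.2.2.1 then fin.1.insert (fin.2.2.2.2 + 1) (PySem.Str.join " " fin.2.2.1, fin.2.1) else fin.1).items

-- ===== PORT B =====
-- transcription of Source B: the outer 'while i < n' visits each maximal same-tag run once;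
-- the inner 'while j < n and tagged[j][1] == tag' is the takeWhile/dropWhile split of the tail.
def create_map_entities_altLoop (m : PySem.Dict Int (String × String)) (i : Int) :
    List (String × String) → PySem.Dict Int (String × String)
  | [] => m
  | (tok, tag) :: rest =>
    let grp := rest.takeWhile (fun p => p.2 == tag)
    let rest' := rest.dropWhile (fun p => p.2 == tag)
    let m' := if tag ≠ "0" then
        m.insert (i + 1) (PySem.Str.join " " (tok :: grp.map Prod.fst), tag)
      else m
    create_map_entities_altLoop m' (i + 1 + grp.length) rest'
termination_by l => l.length
decreasing_by
  exact Nat.lt_succ_of_le (List.length_dropWhile_le _ _)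

def create_map_entities_alt (tagged : List (String × String)) : List (Int × String × String) :=
  (create_map_entities_altLoop PySem.Dict.empty 0 tagged).items

-- ===== PRECONDITION & SPEC =====
def Spec_create_map_entities (tagged : List (String × String)) (out : List (Int × String × String)) : Prop := out = create_map_entities_alt tagged
instance (tagged : List (String × String)) (out : List (Int × String × String)) : Decidable (Spec_create_map_entities tagged out) := by unfold Spec_create_map_entities; infer_instance

-- ===== CLAIM (what is proved, stated in full; the proofs are below) =====
def Claim_equal_create_map_entities : Prop := ∀ (tagged : List (String × String)), Dom_create_map_entities tagged → Spec_create_map_entities tagged (create_map_entities tagged)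

-- ===== LEMMAS AND PROOFS =====

-- A's loop state: (m, prev_tag, ent_list, entpresent, start)
abbrev StA := PySem.Dict Int (String × String) × String × List String × Bool × Int

-- A's loop body on an (index, (token, tag)) element
def stepA (st : StA) (e : Int × String × String) : StA :=
  let m := st.1
  let prev_tag := st.2.1
  let ent_list := st.2.2.1
  let entpresent := st.2.2.2.1
  let start := st.2.2.2.2
  let t := e.1
  let token := e.2.1
  let tag := e.2.2
  if tag ≠ prev_tag then
    if entpresent then
      if tag ≠ "0" then
        (m.insert (start + 1) (PySem.Str.join " " ent_list, prev_tag), tag, [token], true, t)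
      else
        (m.insert (start + 1) (PySem.Str.join " " ent_list, prev_tag), tag, [], false, start)
    else
      (m, tag, [token], true, t)
  else if tag = prev_tag ∧ entpresent then
    (m, tag, ent_list ++ [token], entpresent, start)
  else
    (m, tag, ent_list, entpresent, start)

-- the post-loop flush
def finishA (st : StA) : PySem.Dict Int (String × String) :=
  if st.2.2.2.1 then st.1.insert (st.2.2.2.2 + 1) (PySem.Str.join " " st.2.2.1, st.2.1) else st.1

def runA (st : StA) (l : List (Int × String × String)) : PySem.Dict Int (String × String) :=
  finishA (l.foldl stepA st)

lemma bridgeA (tagged : List (String × String)) :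
    ∀ (fuel k : Nat) (S : StA), tagged.length ≤ k + fuel →
    (PySem.List.pyRange (k : Int) (PySem.List.len tagged) 1).foldl
        (fun (st : StA) (t : Int) => stepA st (t, PySem.List.pyGetD tagged t ("", ""))) S
      = (PySem.List.enumerate (tagged.drop k) (k : Int)).foldl stepA S := by
  intro fuel
  induction fuel with
  | zero =>
    intro k S h
    rw [PySem.List.pyRange_one_eq_nil (by simp; exact_mod_cast h),
        List.drop_eq_nil_of_le (by omega), PySem.List.enumerate_nil]
    rfl
  | succ fuel ih =>
    intro k S h
    by_cases hk : tagged.length ≤ k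
    · rw [PySem.List.pyRange_one_eq_nil (by simp; exact_mod_cast hk),
          List.drop_eq_nil_of_le (by omega), PySem.List.enumerate_nil]
      rfl
    · have hk' : k < tagged.length := by omega
      rw [PySem.List.pyRange_one_cons (by simp; exact_mod_cast hk'),
          List.drop_eq_getElem_cons hk', PySem.List.enumerate_cons,
          List.foldl_cons, List.foldl_cons]
      have hg : PySem.List.pyGetD tagged (k : Int) ("", "") = tagged[k] := by
        rw [PySem.List.pyGetD_natCast]
        exact List.getD_eq_getElem tagged ("", "") hk'
      simp only [hg]
      have hih := ih (k + 1) (stepA S ((k : Int), tagged[k])) (by omega)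
      push_cast at hih ⊢
      exact hih

lemma run_zero : ∀ (grp : List (String × String)), (∀ x ∈ grp, x.2 = "0") →
    ∀ (i : Int) (m : PySem.Dict Int (String × String)) (s : Int),
    (PySem.List.enumerate grp i).foldl stepA (m, "0", [], false, s) = (m, "0", [], false, s) := by
  intro grp
  induction grp with
  | nil => intro _ i m s; simp [PySem.List.enumerate_nil]
  | cons x rest ih =>
    intro h i m s
    have hx : x.2 = "0" := h x (by simp)
    rw [PySem.List.enumerate_cons, List.foldl_cons]
    have hs : stepA (m, "0", [], false, s) (i, x) = (m, "0", [], false, s) := by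
      simp [stepA, hx]
    rw [hs]
    exact ih (fun y hy => h y (by simp [hy])) (i + 1) m s

lemma run_flat : ∀ (grp : List (String × String)) (p : String), (∀ x ∈ grp, x.2 = p) →
    ∀ (i : Int) (m : PySem.Dict Int (String × String)) (el : List String) (s : Int),
    (PySem.List.enumerate grp i).foldl stepA (m, p, el, true, s)
      = (m, p, el ++ grp.map Prod.fst, true, s) := by
  intro grp
  induction grp with
  | nil => intro p _ i m el s; simp [PySem.List.enumerate_nil]
  | cons x rest ih =>
    intro p h i m el s
    have hx : x.2 = p := h x (by simp)
    rw [PySem.List.enumerate_cons, List.foldl_cons]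
    have hs : stepA (m, p, el, true, s) (i, x) = (m, p, el ++ [x.1], true, s) := by
      simp [stepA, hx]
    rw [hs, ih p (fun y hy => h y (by simp [hy])) (i + 1) m (el ++ [x.1]) s]
    simp

lemma dropWhile_head_false {α : Type} (p : α → Bool) (l : List α) (x : α) (xs : List α)
    (h : l.dropWhile p = x :: xs) : p x = false := by
  have hh := List.head_dropWhile_not p (l := l) (by simp [h])
  simpa [h] using hh

lemma closeA (p : String) (hp : p ≠ "0") (e : Int × String × String) (he : e.2.2 ≠ p)
    (m : PySem.Dict Int (String × String)) (el : List String) (s : Int) :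
    stepA (m, p, el, true, s) e
      = stepA (m.insert (s + 1) (PySem.Str.join " " el, p), "0", [], false, s) e := by
  by_cases h0 : e.2.2 = "0" <;> simp [stepA, he, h0, Ne.symm hp]

lemma mainA : ∀ (n : Nat) (l : List (String × String)), l.length ≤ n →
    ∀ (i : Int) (m : PySem.Dict Int (String × String)) (s : Int),
    runA (m, "0", [], false, s) (PySem.List.enumerate l i)
      = create_map_entities_altLoop m i l := by
  intro n
  induction n with
  | zero =>
    intro l hl i m s
    have hnil : l = [] := List.eq_nil_of_length_eq_zero (by omega)
    subst hnil
    simp [runA, finishA, PySem.List.enumerate_nil, create_map_entities_altLoop]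
  | succ n ih =>
    intro l hl i m s
    match l with
    | [] => simp [runA, finishA, PySem.List.enumerate_nil, create_map_entities_altLoop]
    | (tok, t) :: rest =>
      have hsplit : rest = rest.takeWhile (fun p => p.2 == t) ++ rest.dropWhile (fun p => p.2 == t) :=
        (List.takeWhile_append_dropWhile).symm
      set grp := rest.takeWhile (fun p => p.2 == t) with hgrp
      set rest' := rest.dropWhile (fun p => p.2 == t) with hrest'
      have hlen : rest'.length ≤ n :=
        le_trans (List.length_dropWhile_le _ _) (by simp at hl; omega)
      have hgtags : ∀ x ∈ grp, x.2 = t := by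
        intro x hx
        have := List.mem_takeWhile_imp hx
        simpa using this
      have henum : PySem.List.enumerate rest (i + 1)
          = PySem.List.enumerate grp (i + 1) ++ PySem.List.enumerate rest' (i + 1 + grp.length) := by
        conv_lhs => rw [hsplit]
        rw [PySem.List.enumerate_append]
      rw [create_map_entities_altLoop]
      by_cases ht : t = "0"
      · subst ht
        have hstep : stepA (m, "0", [], false, s) (i, (tok, "0")) = (m, "0", [], false, s) := by
          simp [stepA]
        rw [runA, PySem.List.enumerate_cons, List.foldl_cons, hstep, henum,
            List.foldl_append, run_zero grp hgtags (i + 1) m s]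
        have hih := ih rest' hlen (i + 1 + grp.length) m s
        rw [runA] at hih
        rw [hih]
        simp [← hgrp, ← hrest']
      · have hstep : stepA (m, "0", [], false, s) (i, (tok, t)) = (m, t, [tok], true, i) := by
          simp [stepA, ht]
        rw [runA, PySem.List.enumerate_cons, List.foldl_cons, hstep, henum,
            List.foldl_append, run_flat grp t hgtags (i + 1) m [tok] i]
        simp only [List.singleton_append]
        match hr : rest' with
        | [] =>
          simp [PySem.List.enumerate_nil, finishA, create_map_entities_altLoop, ht, ← hgrp, ← hrest']
        | e :: rest'' =>
          have het : e.2 ≠ t := by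
            have hh := dropWhile_head_false (fun p => p.2 == t) rest e rest'' hrest'.symm
            simpa using hh
          rw [PySem.List.enumerate_cons, List.foldl_cons,
              closeA t ht ((i + 1 + grp.length), e) (by simpa using het) m (tok :: grp.map Prod.fst) i,
              ← List.foldl_cons, ← PySem.List.enumerate_cons]
          have hih := ih (e :: rest'') hlen (i + 1 + grp.length)
            (m.insert (i + 1) (PySem.Str.join " " (tok :: grp.map Prod.fst), t)) i
          rw [runA] at hih
          rw [hih]
          simp [ht, ← hgrp, ← hrest']

-- ===== VERDICT (by name: the statement is the Claim_ definition above) =====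
theorem create_map_entities_spec : Claim_equal_create_map_entities := by
  intro tagged _
  unfold Spec_create_map_entities create_map_entities_alt
  have h0 : create_map_entities tagged
      = (finishA ((PySem.List.pyRange 0 (PySem.List.len tagged) 1).foldl
          (fun (st : StA) (t : Int) => stepA st (t, PySem.List.pyGetD tagged t ("", "")))
          (PySem.Dict.empty, "0", [], false, 0))).items := by
    simp only [create_map_entities, stepA, finishA, Bool.decide_eq_true]
  rw [h0]
  have hb := bridgeA tagged tagged.length 0 (PySem.Dict.empty, "0", [], false, 0) (by omega)
  simp only [Nat.cast_zero, List.drop_zero] at hb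
  rw [hb]
  have hm := mainA tagged.length tagged le_rfl 0 PySem.Dict.empty 0
  rw [runA] at hm
  rw [hm]
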